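-- pv_equiv track=rewrite | github.com/Mr-cpc/idea_wirkspace | learnp/basic/bupt_2017_12_29/shocomwo.py | shocomwo
-- ===== SOURCE A (Python) =====
-- def shocomwo(licensePlate:str,words:list) -> str:
--     from collections import Counter
--     count_lic = Counter([ch.lower() for ch in licensePlate if ch.isalpha()])
--     ans,least_time = None,float('inf')
--     for word in words:
--         cur_count = Counter(word.lower())
--         for key,value in count_lic.items():
--             if key not in cur_count:
--                 break
--             elif cur_count[key] < value:
--                 break
--             else:
--                 pass
--         else:
--             if len(word) < least_time:
--                 ans,least_time = word,len(word)
--     return ans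
-- ===== SOURCE B (Python) =====
-- def shocomwo(licensePlate: str, words: list) -> str:
--     # Sort-based approach: no Counter at all.  The needed letters, sorted, must be a
--     # subsequence of the word's sorted characters (greedy merge test); scanning the
--     # words in stable length order, the first covering word is the answer.
--     need = sorted(ch.lower() for ch in licensePlate if ch.isalpha())
--     for word in sorted(words, key=len):
--         have = sorted(word.lower())
--         i = 0
--         for ch in have:
--             if i < len(need) and need[i] == ch:
--                 i += 1
--         if i == len(need):
--             return word
--     return None
-- ===== Notes on version B (the rewrite author's own statement) =====
-- stated objective: alternative
-- what changed: A's Counter-containment scan with a hand-tracked running minimum is replaced by a sorting algorithm: the plate letters and each word's characters are sorted and coverage is decided by a greedy sorted-subsequence merge (no counting at all), and the words are scanned in stable length-sorted order, returning the first covering word.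
import Mathlib
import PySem

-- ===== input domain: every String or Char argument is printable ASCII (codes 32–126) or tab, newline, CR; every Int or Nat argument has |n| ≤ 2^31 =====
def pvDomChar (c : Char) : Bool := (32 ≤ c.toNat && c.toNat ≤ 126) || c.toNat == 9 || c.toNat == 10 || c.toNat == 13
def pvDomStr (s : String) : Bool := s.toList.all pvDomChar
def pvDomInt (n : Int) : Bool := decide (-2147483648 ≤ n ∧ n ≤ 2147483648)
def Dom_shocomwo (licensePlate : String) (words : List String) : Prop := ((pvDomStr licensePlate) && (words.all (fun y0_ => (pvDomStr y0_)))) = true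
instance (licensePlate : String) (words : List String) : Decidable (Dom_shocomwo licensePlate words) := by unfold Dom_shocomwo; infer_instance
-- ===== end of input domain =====

-- B replaces A's Counter-containment scan with tracked minimum by sorting: coverage is a greedy
-- sorted-subsequence merge of sorted character lists, and the words are scanned in stable
-- length-sorted order, returning the first covering word (objective: alternative).


-- ===== PORT A =====
/-- A's inner `for key,value in count_lic.items(): … break …` loop: `true` iff the loop
    runs to completion (the `for/else` branch fires). `cur_count[key]` on a Counter is
    `getD key 0` (a Counter returns 0 for a missing key, no KeyError). -/
def shocomwoCheck (items : List (Char × Int)) (cur_count : PySem.Dict Char Int) : Bool :=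
  match items with
  | [] => true
  | (key, value) :: rest =>
    if !(cur_count.contains key) then false          -- if key not in cur_count: break
    else if cur_count.getD key 0 < value then false  -- elif cur_count[key] < value: break
    else shocomwoCheck rest cur_count                -- else: pass

-- `least_time = float('inf')` has no Int counterpart: it is `none` before the first hit and
-- `some n` after; `len(word) < least_time` is vacuously true against `none`, exactly as
-- against float('inf').
def shocomwo (licensePlate : String) (words : List String) : Option String :=
  let count_lic : PySem.Dict Char Int :=
    PySem.Dict.counter ((licensePlate.toList.filter PySem.Str.isalpha).map PySem.Chars.lowerChar)
  let st := words.foldl (fun (st : Option String × Option Int) word =>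
    let cur_count := PySem.Dict.counter (PySem.Chars.lower word.toList)
    if shocomwoCheck count_lic.items cur_count then
      match st.2 with
      | none => (some word, some (PySem.Str.len word))
      | some least =>
        if PySem.Str.len word < least then (some word, some (PySem.Str.len word)) else st
    else st) (none, none)
  st.1

-- ===== PORT B =====
/-- B's inner loop `for ch in have: if i < len(need) and need[i] == ch: i += 1` — the greedy
    sorted-subsequence merge, carrying Python's int index `i` (single ASCII characters compare
    like the one-character Python strings iteration over a str yields). -/
def shocomwoLoop (need : List Char) : List Char → Int → Int
  | [], i => i
  | ch :: rest, i =>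
    if decide (i < (need.length : Int)) && (PySem.List.pyGet? need i == some ch)
    then shocomwoLoop need rest (i + 1)
    else shocomwoLoop need rest i

/-- B's per-word body: `have = sorted(word.lower())`, run the merge, test `i == len(need)`. -/
def shocomwoCovers (need : List Char) (word : String) : Bool :=
  let haveChars := PySem.List.sorted (PySem.Chars.lower word.toList) (fun c => c) false
  shocomwoLoop need haveChars 0 == (need.length : Int)

/-- B's outer loop `for word in sorted(words, key=len): if …: return word` / `return None`. -/
def shocomwoScan (need : List Char) : List String → Option String
  | [] => none
  | w :: rest => if shocomwoCovers need w then some w else shocomwoScan need rest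

def shocomwo_alt (licensePlate : String) (words : List String) : Option String :=
  let need : List Char :=
    PySem.List.sorted ((licensePlate.toList.filter PySem.Str.isalpha).map PySem.Chars.lowerChar)
      (fun c => c) false
  shocomwoScan need (PySem.List.sorted words PySem.Str.len false)

-- ===== PRECONDITION & SPEC =====
def Spec_shocomwo (licensePlate : String) (words : List String) (out : Option String) : Prop := out = shocomwo_alt licensePlate words
instance (licensePlate : String) (words : List String) (out : Option String) : Decidable (Spec_shocomwo licensePlate words out) := by unfold Spec_shocomwo; infer_instance

-- ===== CLAIM (what is proved, stated in full; the proofs are below) =====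
def Claim_equal_shocomwo : Prop := ∀ (licensePlate : String) (words : List String), Dom_shocomwo licensePlate words → Spec_shocomwo licensePlate words (shocomwo licensePlate words)

-- ===== LEMMAS AND PROOFS =====

/-- Structural version of B's greedy merge: the number of matched characters. -/
def pvGreedy : List Char → List Char → Nat
  | [], _ => 0
  | _ :: _, [] => 0
  | a :: n', ch :: h' => if a = ch then pvGreedy n' h' + 1 else pvGreedy (a :: n') h'

lemma pvGreedy_nil (h : List Char) : pvGreedy [] h = 0 := by
  cases h <;> rfl

lemma pvGreedy_nil_right (n : List Char) : pvGreedy n [] = 0 := by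
  cases n <;> rfl

/-- B's index-carrying loop is the structural greedy merge on the un-matched suffix. -/
lemma shocomwoLoop_eq_greedy (need : List Char) (h : List Char) :
    ∀ i : Nat, i ≤ need.length →
      shocomwoLoop need h (i : Int) = (i : Int) + (pvGreedy (need.drop i) h : Int) := by
  induction h with
  | nil => intro i _; simp [shocomwoLoop, pvGreedy_nil_right]
  | cons ch rest ih =>
    intro i hi
    by_cases hlt : i < need.length
    · have hdrop : need.drop i = need[i] :: need.drop (i + 1) :=
        List.drop_eq_getElem_cons hlt
      by_cases hch : need[i] = ch
      · have hcond : (decide ((i : Int) < (need.length : Int)) &&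
            (PySem.List.pyGet? need (i : Int) == some ch)) = true := by
          simp [hlt, hch]
        have : shocomwoLoop need (ch :: rest) (i : Int) = shocomwoLoop need rest ((i : Int) + 1) := by
          show (if _ then _ else _) = _
          rw [hcond]; simp
        rw [this]
        have h1 : ((i : Int) + 1) = ((i + 1 : Nat) : Int) := by push_cast; ring
        rw [h1, ih (i + 1) hlt, hdrop]
        simp [pvGreedy, hch]
        ring
      · have hcond : (decide ((i : Int) < (need.length : Int)) &&
            (PySem.List.pyGet? need (i : Int) == some ch)) = false := by
          simp [hlt, hch]
        have : shocomwoLoop need (ch :: rest) (i : Int) = shocomwoLoop need rest (i : Int) := by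
          show (if _ then _ else _) = _
          rw [hcond]; simp
        rw [this, ih i hi, hdrop]
        have hch' : need[i] ≠ ch := hch
        simp [pvGreedy, hch']
    · have hieq : i = need.length := le_antisymm hi (not_lt.mp hlt)
      have hcond : (decide ((i : Int) < (need.length : Int)) &&
          (PySem.List.pyGet? need (i : Int) == some ch)) = false := by
        simp [hieq]
      have : shocomwoLoop need (ch :: rest) (i : Int) = shocomwoLoop need rest (i : Int) := by
        show (if _ then _ else _) = _
        rw [hcond]; simp
      rw [this, ih i hi]
      simp [hieq, List.drop_length, pvGreedy_nil]

/-- Greedy matches everything when the pattern is a sublist. -/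
lemma pvGreedy_of_sublist (n h : List Char) (hs : List.Sublist n h) : pvGreedy n h = n.length := by
  induction h generalizing n with
  | nil => have := List.sublist_nil.mp hs; subst this; rfl
  | cons ch h' ih =>
    cases n with
    | nil => simp [pvGreedy_nil]
    | cons a n' =>
      by_cases hac : a = ch
      · subst hac
        have hs' : List.Sublist n' h' := List.cons_sublist_cons.mp hs
        simp [pvGreedy, ih n' hs']
      · have hs' : List.Sublist (a :: n') h' := by
          cases hs with
          | cons _ htail => exact htail
          | cons₂ htail => exact absurd rfl hac
        simp [pvGreedy, hac, ih _ hs']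

/-- What greedy matched is a sublist of the text. -/
lemma pvGreedy_take_sublist (n h : List Char) : List.Sublist (n.take (pvGreedy n h)) h := by
  induction h generalizing n with
  | nil => cases n <;> simp [pvGreedy]
  | cons ch h' ih =>
    cases n with
    | nil => simp [pvGreedy_nil]
    | cons a n' =>
      by_cases hac : a = ch
      · subst hac
        simpa [pvGreedy, List.take_succ_cons] using List.Sublist.cons₂ a (ih n')
      · exact (by simpa [pvGreedy, hac] using (ih (a :: n')).trans (List.sublist_cons_self ch h'))

lemma pvGreedy_full_iff (n h : List Char) : pvGreedy n h = n.length ↔ List.Sublist n h := by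
  constructor
  · intro he
    have := pvGreedy_take_sublist n h
    rwa [he, List.take_length] at this
  · exact pvGreedy_of_sublist n h

/-- A sorted list whose counts are dominated by another sorted list's counts is a sublist of it. -/
lemma sublist_of_counts_le (h : List Char) : ∀ n : List Char,
    n.Pairwise (· ≤ ·) → h.Pairwise (· ≤ ·) →
    (∀ c, n.count c ≤ h.count c) → List.Sublist n h := by
  induction h with
  | nil =>
    intro n _ _ hc
    cases n with
    | nil => exact List.Sublist.refl _
    | cons a n' =>
      have := hc a
      simp [List.count_cons_self] at this
  | cons ch h' ih =>
    intro n hn hh hc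
    cases n with
    | nil => exact List.nil_sublist _
    | cons a n' =>
      rcases lt_trichotomy a ch with hlt | heq | hgt
      · -- a < ch: a cannot occur in h at all
        exfalso
        have hnot : a ∉ (ch :: h') := by
          intro hmem
          rcases List.mem_cons.mp hmem with heq' | hmem'
          · exact absurd heq' (ne_of_lt hlt)
          · have := (List.pairwise_cons.mp hh).1 a hmem'
            exact absurd (lt_of_lt_of_le hlt this) (lt_irrefl a)
        have h0 : (ch :: h').count a = 0 := List.count_eq_zero.mpr hnot
        have := hc a
        rw [h0] at this
        simp [List.count_cons_self] at this
      · -- equal heads: peel both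
        subst heq
        apply List.cons_sublist_cons.mpr
        apply ih n' (List.Pairwise.sublist (List.sublist_cons_self a n') hn)
          ((List.pairwise_cons.mp hh).2)
        intro c
        have hcc := hc c
        by_cases hca : c = a
        · subst hca
          simp only [List.count_cons_self] at hcc
          omega
        · rwa [List.count_cons_of_ne (fun hxy => hca hxy.symm), List.count_cons_of_ne (fun hxy => hca hxy.symm)] at hcc
      · -- ch < a: ch cannot occur in n, drop it from h
        apply List.Sublist.cons
        apply ih (a :: n') hn ((List.pairwise_cons.mp hh).2)
        intro c
        by_cases hcc : c = ch
        · subst hcc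
          have hnot : c ∉ (a :: n') := by
            intro hmem
            rcases List.mem_cons.mp hmem with heq' | hmem'
            · exact absurd (heq' ▸ hgt) (lt_irrefl _)
            · have := (List.pairwise_cons.mp hn).1 c hmem'
              exact absurd (lt_of_lt_of_le hgt this) (lt_irrefl _)
          simp [List.count_eq_zero.mpr hnot]
        · have := hc c
          rwa [List.count_cons_of_ne (fun hxy => hcc hxy.symm)] at this

/-- Every count stored in a Counter is at least 1. -/
lemma counter_items_pos (xs : List Char) :
    ∀ kv ∈ (PySem.Dict.counter xs).items, (1 : Int) ≤ kv.2 := by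
  intro kv hkv
  rw [PySem.Dict.items_counter] at hkv
  rcases List.mem_map.1 hkv with ⟨k, hk, rfl⟩
  rw [PySem.Set.mem_ofList] at hk
  have h := List.count_pos_iff.2 hk
  show (1 : Int) ≤ (List.count k xs : Int)
  exact_mod_cast h

/-- A's break/else loop agrees with the count-domination test on any item list with counts ≥ 1. -/
lemma check_eq_all (items : List (Char × Int)) (cur : PySem.Dict Char Int)
    (hpos : ∀ kv ∈ items, (1 : Int) ≤ kv.2) :
    shocomwoCheck items cur = items.all (fun kv => decide (kv.2 ≤ cur.getD kv.1 0)) := by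
  induction items with
  | nil => rfl
  | cons kv rest ih =>
    obtain ⟨key, value⟩ := kv
    have hv : (1 : Int) ≤ value := hpos _ (List.mem_cons_self)
    simp only [shocomwoCheck, List.all_cons]
    by_cases hc : cur.contains key
    · by_cases hlt : cur.getD key 0 < value
      · have h1 : ¬ (value ≤ cur.getD key 0) := by omega
        simp [hc, hlt, h1]
      · have h1 : value ≤ cur.getD key 0 := by omega
        simp [hc, hlt, h1, ih (fun kv h => hpos kv (List.mem_cons_of_mem _ h))]
    · have h0 : cur.getD key 0 = 0 :=
        PySem.Dict.getD_of_not_contains cur 0 (by simpa using hc)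
      have h1 : ¬ (value ≤ 0) := by omega
      simp [hc, h0, h1]

/-- A's per-word acceptance test ↔ count domination of the raw character lists. -/
lemma check_iff_counts (needChars haveChars : List Char) :
    shocomwoCheck (PySem.Dict.counter needChars).items (PySem.Dict.counter haveChars) = true ↔
      ∀ c, needChars.count c ≤ haveChars.count c := by
  rw [check_eq_all _ _ (counter_items_pos needChars)]
  rw [PySem.Dict.items_counter]
  simp only [List.all_map, List.all_eq_true, Function.comp]
  constructor
  · intro hall c
    by_cases hmem : c ∈ needChars
    · have := hall c (by rw [PySem.Set.mem_ofList]; exact hmem)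
      simp only [PySem.Dict.getD_counter, decide_eq_true_eq] at this
      exact_mod_cast this
    · simp [List.count_eq_zero.mpr hmem]
  · intro hcount k _
    simp only [PySem.Dict.getD_counter, decide_eq_true_eq]
    exact_mod_cast hcount k

/-- B's per-word acceptance test ↔ the same count domination (via the greedy merge). -/
lemma covers_iff_counts (needChars : List Char) (word : String) :
    shocomwoCovers (PySem.List.sorted needChars (fun c => c) false) word = true ↔
      ∀ c, needChars.count c ≤ (PySem.Chars.lower word.toList).count c := by
  set sn := PySem.List.sorted needChars (fun c => c) false with hsn
  set sh := PySem.List.sorted (PySem.Chars.lower word.toList) (fun c => c) false with hsh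
  have h0 : shocomwoLoop sn sh 0 = (pvGreedy sn sh : Int) := by
    simpa using shocomwoLoop_eq_greedy sn sh 0 (Nat.zero_le _)
  have hc0 : shocomwoCovers sn word = (shocomwoLoop sn sh 0 == (sn.length : Int)) := rfl
  rw [hc0, h0]
  have hpn : sn.Pairwise (· ≤ ·) := by
    simpa using PySem.List.sorted_pairwise needChars (fun c => c)
  have hph : sh.Pairwise (· ≤ ·) := by
    simpa using PySem.List.sorted_pairwise (PySem.Chars.lower word.toList) (fun c => c)
  have hperm_n : sn.Perm needChars := PySem.List.sorted_perm needChars (fun c => c) false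
  have hperm_h : sh.Perm (PySem.Chars.lower word.toList) :=
    PySem.List.sorted_perm (PySem.Chars.lower word.toList) (fun c => c) false
  constructor
  · intro hb c
    have he : pvGreedy sn sh = sn.length := by
      have hb' := (beq_iff_eq (a := (pvGreedy sn sh : Int)) (b := (sn.length : Int))).mp hb
      exact_mod_cast hb'
    have hsub : List.Sublist sn sh := (pvGreedy_full_iff sn sh).mp he
    calc needChars.count c = sn.count c := (hperm_n.count_eq c).symm
      _ ≤ sh.count c := hsub.count_le c
      _ = (PySem.Chars.lower word.toList).count c := hperm_h.count_eq c
  · intro hcount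
    have hsub : List.Sublist sn sh := by
      apply sublist_of_counts_le sh sn hpn hph
      intro c
      rw [hperm_n.count_eq c, hperm_h.count_eq c]
      exact hcount c
    have := (pvGreedy_full_iff sn sh).mpr hsub
    simp [this]

/-- B's two tests agree with A's, word by word. -/
lemma covers_eq_check (needChars : List Char) (word : String) :
    shocomwoCovers (PySem.List.sorted needChars (fun c => c) false) word =
      shocomwoCheck (PySem.Dict.counter needChars).items
        (PySem.Dict.counter (PySem.Chars.lower word.toList)) := by
  by_cases hc : ∀ c, needChars.count c ≤ (PySem.Chars.lower word.toList).count c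
  · rw [(covers_iff_counts needChars word).mpr hc, ((check_iff_counts _ _).mpr hc)]
  · have h1 := (covers_iff_counts needChars word)
    have h2 := (check_iff_counts needChars (PySem.Chars.lower word.toList))
    rw [Bool.eq_iff_iff, h1, h2]

/-- B's outer loop is `List.find?`. -/
lemma scan_eq_find? (need : List Char) (ws : List String) :
    shocomwoScan need ws = ws.find? (shocomwoCovers need) := by
  induction ws with
  | nil => rfl
  | cons w rest ih =>
    by_cases hw : shocomwoCovers need w
    · simp [shocomwoScan, List.find?, hw]
    · simp [shocomwoScan, List.find?, hw, ih]

/-- Inserting into a key-sorted list: where the first hit of `p` lands. -/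
lemma find?_insertBy {α κ : Type} [LinearOrder κ] (p : α → Bool) (key : α → κ) (x : α)
    (ys : List α) (hys : ys.Pairwise (fun a b => key a ≤ key b)) :
    List.find? p (PySem.List.insertBy (fun a b => decide (key a < key b)) x ys) =
      if p x then
        match List.find? p ys with
        | none => some x
        | some m => if key x < key m then some x else some m
      else List.find? p ys := by
  induction ys with
  | nil =>
    by_cases hp : p x <;> simp [PySem.List.insertBy, List.find?, hp]
  | cons y ys' ih =>
    have hy_le : ∀ b ∈ ys', key y ≤ key b := (List.pairwise_cons.mp hys).1
    have hys' : ys'.Pairwise (fun a b => key a ≤ key b) := (List.pairwise_cons.mp hys).2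
    by_cases hb : key x < key y
    · -- x goes in front
      have hins : PySem.List.insertBy (fun a b => decide (key a < key b)) x (y :: ys') =
          x :: y :: ys' := by simp [PySem.List.insertBy, hb]
      rw [hins]
      by_cases hp : p x
      · rw [List.find?_cons_of_pos hp, if_pos hp]
        cases hfy : List.find? p (y :: ys') with
        | none => rfl
        | some m =>
          have hm : m ∈ (y :: ys') := List.mem_of_find?_eq_some hfy
          have hym : key y ≤ key m := by
            rcases List.mem_cons.mp hm with rfl | hm'
            · exact le_refl _
            · exact hy_le m hm'
          show some x = if key x < key m then some x else some m
          rw [if_pos (lt_of_lt_of_le hb hym)]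
      · rw [List.find?_cons_of_neg (by simpa using hp), if_neg hp]
    · -- x goes after y
      have hins : PySem.List.insertBy (fun a b => decide (key a < key b)) x (y :: ys') =
          y :: PySem.List.insertBy (fun a b => decide (key a < key b)) x ys' := by
        simp [PySem.List.insertBy, hb]
      rw [hins]
      by_cases hpy : p y
      · rw [List.find?_cons_of_pos hpy, List.find?_cons_of_pos hpy]
        by_cases hp : p x
        · rw [if_pos hp]
          show some y = if key x < key y then some x else some y
          rw [if_neg hb]
        · rw [if_neg hp]
      · rw [List.find?_cons_of_neg (by simpa using hpy),
          List.find?_cons_of_neg (by simpa using hpy), ih hys']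

/-- `min?` over a snoc. -/
lemma min?_snoc {α κ : Type} [LT κ] [DecidableLT κ] (l : List α) (x : α) (key : α → κ) :
    PySem.List.min? (l ++ [x]) key =
      match PySem.List.min? l key with
      | none => some x
      | some m => if key x < key m then some x else some m := by
  simp only [PySem.List.min?, List.foldl_append, List.foldl_cons, List.foldl_nil]
  rfl

/-- First hit of `p` in the stable key-sorted list = first key-minimal element of the filter. -/
lemma find?_sorted_eq_min?_filter {α κ : Type} [LinearOrder κ] (p : α → Bool) (key : α → κ)
    (xs : List α) :
    List.find? p (PySem.List.sorted xs key false) = PySem.List.min? (xs.filter p) key := by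
  induction xs using List.reverseRecOn with
  | nil => rfl
  | append_singleton xs x ih =>
    have hsnoc : PySem.List.sorted (xs ++ [x]) key false =
        PySem.List.insertBy (fun a b => decide (key a < key b)) x
          (PySem.List.sorted xs key false) := by
      rw [PySem.List.sorted_eq_foldl_insertBy, PySem.List.sorted_eq_foldl_insertBy,
        List.foldl_append]
      rfl
    rw [hsnoc, find?_insertBy p key x _ (PySem.List.sorted_pairwise xs key), ih]
    by_cases hp : p x
    · rw [if_pos hp]
      rw [List.filter_append, List.filter_cons, if_pos hp]
      simp only [List.filter_nil]
      rw [min?_snoc]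
    · rw [if_neg (by simpa using hp)]
      rw [List.filter_append, List.filter_cons, if_neg (by simpa using hp)]
      simp [List.filter_nil]

/-- A's minimum-tracking fold computes the first length-minimal element (min?'s fold),
    provided the state's second component mirrors the first's length. -/
lemma fold_min (ws : List String) :
    ∀ (st : Option String × Option Int), st.2 = st.1.map PySem.Str.len →
    (ws.foldl (fun st word =>
      match st.2 with
      | none => (some word, some (PySem.Str.len word))
      | some least =>
        if PySem.Str.len word < least then (some word, some (PySem.Str.len word)) else st)
      st).1
    = ws.foldl (fun acc x =>
        match acc with
        | none => some x
        | some m => if PySem.Str.len x < PySem.Str.len m then some x else some m) st.1 := by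
  induction ws with
  | nil => intro st h; rfl
  | cons w t ih =>
    intro st h
    simp only [List.foldl_cons]
    rcases st with ⟨a, la⟩
    cases a with
    | none =>
      simp only [Option.map_none] at h; subst h
      exact ih (some w, some (PySem.Str.len w)) rfl
    | some a0 =>
      simp only [Option.map_some] at h; subst h
      by_cases hlt : PySem.Str.len w < PySem.Str.len a0
      · simp only [hlt, if_true]
        exact ih (some w, some (PySem.Str.len w)) rfl
      · simp only [if_neg hlt]
        exact ih (some a0, some (PySem.Str.len a0)) rfl

-- ===== VERDICT (by name: the statement is the Claim_ definition above) =====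
theorem shocomwo_spec : Claim_equal_shocomwo := by
  intro licensePlate words _
  unfold Spec_shocomwo shocomwo shocomwo_alt
  dsimp only
  set needChars : List Char :=
    (licensePlate.toList.filter PySem.Str.isalpha).map PySem.Chars.lowerChar with hneedChars
  -- A's guarded fold is a fold over the filtered list
  rw [PySem.List.foldl_if_eq_foldl_filter
    (fun word => shocomwoCheck (PySem.Dict.counter needChars).items
      (PySem.Dict.counter (PySem.Chars.lower word.toList)))
    (fun (st : Option String × Option Int) word =>
      match st.2 with
      | none => (some word, some (PySem.Str.len word))
      | some least =>
        if PySem.Str.len word < least then (some word, some (PySem.Str.len word)) else st)]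
  -- and that fold's first component is min? of the filtered list
  rw [fold_min _ (none, none) rfl]
  rw [show List.foldl (fun acc x =>
        match acc with
        | none => some x
        | some m => if PySem.Str.len x < PySem.Str.len m then some x else some m)
        none (List.filter _ words)
      = PySem.List.min? (List.filter (fun word =>
          shocomwoCheck (PySem.Dict.counter needChars).items
            (PySem.Dict.counter (PySem.Chars.lower word.toList))) words) PySem.Str.len by
    unfold PySem.List.min?
    exact (PySem.List.foldl_congr_mem _ _ _ _ (by intro acc x _; cases acc <;> rfl)).symm]
  -- B's scan is find? on the sorted list, which is min? of the filter
  rw [scan_eq_find?, find?_sorted_eq_min?_filter]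
  -- the two filters coincide word by word
  congr 1
  apply List.filter_congr
  intro w _
  exact (covers_eq_check needChars w).symm
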